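-- pv_equiv track=rewrite | github.com/Tarun-015/365_days_coding | Day-25/42.py | most_occuring_first_letter
-- ===== SOURCE A (Python) =====
-- def most_occuring_first_letter(passage: str) -> str:
--     '''
--     Returns the letter which occurs most frequently
--     as the first letter of any word.(case insensitive)
--
--     Args:
--         passage (str): A multi-line string representing the passage.
--
--     Returns:
--         str: The most frequently occurring first letter in lowercase.
--     '''
--
--
--     first_letter_counts = {}
--     for word in passage.lower().split():
--         first_letter = word[0]
--         if first_letter not in first_letter_counts:
--             first_letter_counts[first_letter] = 0
--         first_letter_counts[first_letter] += 1
--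
--     return max(first_letter_counts, key=first_letter_counts.get)
-- ===== SOURCE B (Python) =====
-- def most_occuring_first_letter(passage: str) -> str:
--     # Selection by successive extraction: repeatedly take the first remaining
--     # letter, count it by the length drop after filtering it out, and keep the
--     # best (strict improvement keeps the earliest-first-occurring letter on ties).
--     rest = [word[0] for word in passage.lower().split()]
--     best = None
--     best_count = 0
--     while rest:
--         letter = rest[0]
--         remaining = [x for x in rest if x != letter]
--         count = len(rest) - len(remaining)
--         if count > best_count:
--             best, best_count = letter, count
--         rest = remaining
--     return best
-- ===== Notes on version B (the rewrite author's own statement) =====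
-- stated objective: alternative
-- what changed: Replaces the counting dictionary and final max-over-keys with a selection-by-successive-extraction loop: repeatedly take the first remaining first-letter, count it by the length drop after filtering it out of the shrinking list, and keep the best on strict improvement (which preserves A's earliest-first-occurrence tie-break).
import Mathlib
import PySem

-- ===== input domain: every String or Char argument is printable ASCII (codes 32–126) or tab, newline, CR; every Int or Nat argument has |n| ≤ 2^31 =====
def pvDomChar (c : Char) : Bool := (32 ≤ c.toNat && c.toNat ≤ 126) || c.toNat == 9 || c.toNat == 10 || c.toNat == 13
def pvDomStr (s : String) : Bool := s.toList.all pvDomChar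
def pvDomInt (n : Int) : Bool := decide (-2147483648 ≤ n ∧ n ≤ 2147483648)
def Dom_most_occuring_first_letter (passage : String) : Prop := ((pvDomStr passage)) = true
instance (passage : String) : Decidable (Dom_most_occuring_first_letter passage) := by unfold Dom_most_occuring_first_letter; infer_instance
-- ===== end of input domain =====

-- B replaces A's counting dictionary and max-over-keys with a selection-by-successive-extraction
-- loop over a shrinking list (objective: alternative). Equivalence of return values is proved.

-- ===== PORT A =====
def most_occuring_first_letter (passage : String) : String :=
  let counts : PySem.Dict Char Int :=
    (PySem.Str.split₀ (PySem.Str.lower passage)).foldl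
      (fun d w =>
        match PySem.Str.pyGet? w 0 with   -- word[0]; none is unreachable: split() yields nonempty words
        | none => d
        | some first_letter =>
          let d := if d.contains first_letter then d else d.insert first_letter 0
          d.insert first_letter (d.getD first_letter 0 + 1))
      PySem.Dict.empty
  match PySem.List.max? counts.keys (fun k => counts.getD k 0) with
  | some c => String.ofList [c]
  | none => ""   -- Python raises ValueError (max of empty dict); excluded by Pre_

-- ===== PORT B =====
-- B's while loop over the shrinking list (rest, best, best_count).
def pvSel : List Char → Option Char → Nat → Option Char
  | [], best, _ => best
  | letter :: t, best, best_count =>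
    let remaining := (letter :: t).filter (fun x => x != letter)
    let count := (letter :: t).length - remaining.length
    if best_count < count then pvSel remaining (some letter) count
    else pvSel remaining best best_count
termination_by l _ _ => l.length
decreasing_by
  all_goals
    simp only [List.filter_cons, bne_self_eq_false, Bool.false_eq_true, if_false]
    exact Nat.lt_succ_of_le (List.length_filter_le _ _)

def most_occuring_first_letter_alt (passage : String) : String :=
  let firsts : List Char :=
    (PySem.Str.split₀ (PySem.Str.lower passage)).filterMap
      (fun w => PySem.Str.pyGet? w 0)   -- word[0]; none is unreachable: split() yields nonempty words
  match pvSel firsts none 0 with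
  | some c => String.ofList [c]
  | none => ""   -- Python B returns None here (no word); excluded by Pre_

-- ===== PRECONDITION & SPEC =====
-- Pre_ excludes exactly the passages with no word (empty or all whitespace), on which
-- A raises ValueError (max() of an empty dict) and B returns None instead of a str.
def Pre_most_occuring_first_letter (passage : String) : Prop :=
  PySem.Str.split₀ (PySem.Str.lower passage) ≠ []
instance (passage : String) : Decidable (Pre_most_occuring_first_letter passage) := by
  unfold Pre_most_occuring_first_letter; infer_instance
def pvWitness_most_occuring_first_letter : String := "Hello world how are you"

def Spec_most_occuring_first_letter (passage : String) (out : String) : Prop :=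
  out = most_occuring_first_letter_alt passage
instance (passage : String) (out : String) : Decidable (Spec_most_occuring_first_letter passage out) := by
  unfold Spec_most_occuring_first_letter; infer_instance

-- ===== CLAIM (what is proved, stated in full; the proofs are below) =====
def Claim_equal_most_occuring_first_letter : Prop :=
  ∀ (passage : String), Dom_most_occuring_first_letter passage →
    Pre_most_occuring_first_letter passage →
    Spec_most_occuring_first_letter passage (most_occuring_first_letter passage)

-- ===== LEMMAS AND PROOFS =====

-- A's fold step (set default 0, then increment) is the plain counter step.
theorem pvStepA_eq {κ : Type} [BEq κ] [LawfulBEq κ] [DecidableEq κ] (d : PySem.Dict κ Int) (c : κ) :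
    (let d' := if d.contains c then d else d.insert c 0
     d'.insert c (d'.getD c 0 + 1)) = d.insert c (d.getD c 0 + 1) := by
  by_cases h : d.contains c = true
  · simp [h]
  · simp only [Bool.not_eq_true] at h
    simp [h, PySem.Dict.insert_insert_self, PySem.Dict.getD_of_not_contains d 0 h]

theorem pvFind?_congr_mem {α : Type} (l : List α) (p q : α → Bool)
    (h : ∀ x ∈ l, p x = q x) : l.find? p = l.find? q := by
  induction l with
  | nil => rfl
  | cons a t ih =>
    rw [List.find?_cons, List.find?_cons, h a List.mem_cons_self]
    cases q a
    · exact ih (fun x hx => h x (List.mem_cons_of_mem a hx))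
    · rfl

-- Python max's fold step, named so the lemmas below match syntactically.
def pvStep {α κ : Type} [LT κ] [DecidableLT κ] (key : α → κ) (acc : Option α) (x : α) : Option α :=
  match acc with
  | none => some x
  | some b => if key b < key x then some x else some b

theorem pvMax?_eq_foldl {α κ : Type} [LT κ] [DecidableLT κ] (key : α → κ) (l : List α) :
    PySem.List.max? l key = List.foldl (pvStep key) none l := rfl

-- Characterisation of Python max with key: the FIRST element attaining the global maximum key.
theorem pvFoldl_maxstep {α κ : Type} [LinearOrder κ] (key : α → κ) :
    ∀ (l : List α) (m : α),
      List.foldl (pvStep key) (some m) l =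
      if l.all (fun y => decide (key y ≤ key m)) then some m
      else l.find? (fun x => decide (key m < key x) && l.all (fun y => decide (key y ≤ key x))) := by
  intro l
  induction l with
  | nil => intro m; simp
  | cons a t ih =>
    intro m
    rw [List.foldl_cons]
    by_cases hma : key m < key a
    · have hstep : pvStep key (some m) a = some a := by simp [pvStep, hma]
      have hnot : ¬ (((a :: t).all fun y => decide (key y ≤ key m)) = true) := by
        simp only [List.all_cons, Bool.and_eq_true, decide_eq_true_eq]
        intro h
        exact absurd h.1 (not_le.mpr hma)
      rw [hstep, if_neg hnot, ih a, List.find?_cons]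
      by_cases hta : (t.all fun y => decide (key y ≤ key a)) = true
      · rw [if_pos hta]
        have ha1 : (decide (key m < key a) && ((a :: t).all fun y => decide (key y ≤ key a))) = true := by
          simp [hma, List.all_cons]
          intro y hy
          exact of_decide_eq_true (List.all_eq_true.mp hta y hy)
        rw [ha1]
      · rw [if_neg hta]
        have ha0 : (decide (key m < key a) && ((a :: t).all fun y => decide (key y ≤ key a))) = false := by
          simp only [Bool.and_eq_false_iff]; right; simpa using hta
        rw [ha0]
        apply pvFind?_congr_mem
        intro x hx
        by_cases htx : (t.all fun y => decide (key y ≤ key x)) = true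
        · have hax : key a < key x := by
            obtain ⟨y, hy, hya⟩ := by simpa [List.all_eq_true, not_le] using hta
            exact lt_of_lt_of_le hya (of_decide_eq_true (List.all_eq_true.mp htx y hy))
          simp [List.all_cons, htx, hax, le_of_lt hax, lt_trans hma hax]
        · simp only [Bool.not_eq_true] at htx
          simp [List.all_cons, htx]
    · have hstep : pvStep key (some m) a = some m := by simp [pvStep, hma]
      rw [hstep, ih m]
      have hcons : ((a :: t).all fun y => decide (key y ≤ key m)) = (t.all fun y => decide (key y ≤ key m)) := by
        simp [List.all_cons, not_lt.mp hma]
      rw [hcons]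
      by_cases htm : (t.all fun y => decide (key y ≤ key m)) = true
      · rw [if_pos htm, if_pos htm]
      · rw [if_neg htm, if_neg htm, List.find?_cons]
        have ha0 : (decide (key m < key a) && ((a :: t).all fun y => decide (key y ≤ key a))) = false := by
          simp [hma]
        rw [ha0]
        apply pvFind?_congr_mem
        intro x hx
        by_cases hmx : key m < key x
        · have hax : key a ≤ key x := le_trans (not_lt.mp hma) (le_of_lt hmx)
          simp [List.all_cons, hmx, hax]
        · simp [hmx]

theorem pvMax?_eq_first_max {α κ : Type} [LinearOrder κ] (key : α → κ) (l : List α) :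
    PySem.List.max? l key = l.find? (fun x => l.all fun y => decide (key y ≤ key x)) := by
  cases l with
  | nil => rfl
  | cons a t =>
    rw [pvMax?_eq_foldl, List.foldl_cons]
    have hstep : pvStep key none a = some a := rfl
    rw [hstep, pvFoldl_maxstep key t a, List.find?_cons]
    have hpa : ((a :: t).all fun y => decide (key y ≤ key a)) = (t.all fun y => decide (key y ≤ key a)) := by
      simp [List.all_cons]
    rw [hpa]
    by_cases hta : (t.all fun y => decide (key y ≤ key a)) = true
    · rw [if_pos hta, hta]
    · rw [if_neg hta]
      have hta' : (t.all fun y => decide (key y ≤ key a)) = false := by simpa using hta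
      rw [hta']
      apply pvFind?_congr_mem
      intro x hx
      by_cases htx : (t.all fun y => decide (key y ≤ key x)) = true
      · have hax : key a < key x := by
          obtain ⟨y, hy, hya⟩ := by simpa [List.all_eq_true, not_le] using hta
          exact lt_of_lt_of_le hya (of_decide_eq_true (List.all_eq_true.mp htx y hy))
        simp [List.all_cons, htx, hax, le_of_lt hax]
      · simp only [Bool.not_eq_true] at htx
        simp [List.all_cons, htx]

-- find? commutes with ordered dedup (PySem.Set.ofList): generalised over the accumulator.
theorem pvFind?_foldl_add {α : Type} [BEq α] [LawfulBEq α] (p : α → Bool) :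
    ∀ (xs : List α) (s : PySem.Set α),
      List.find? p (List.foldl PySem.Set.add s xs) =
      (List.find? p s).or (List.find? (fun x => p x && !(List.contains s x)) xs) := by
  intro xs
  induction xs with
  | nil => intro s; simp
  | cons a t ih =>
    intro s
    rw [List.foldl_cons, ih, List.find?_cons]
    by_cases hs : List.contains s a = true
    · have hadd : PySem.Set.add s a = s := by
        simp only [PySem.Set.add, PySem.Set.contains, hs, if_pos]
      have h0 : (p a && !(List.contains s a)) = false := by
        rw [hs, Bool.not_true, Bool.and_false]
      rw [hadd, h0]
    · simp only [Bool.not_eq_true] at hs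
      have hadd : PySem.Set.add s a = s ++ [a] := by
        simp only [PySem.Set.add, PySem.Set.contains, hs, Bool.false_eq_true, if_false]
      have h2 : (p a && !(List.contains s a)) = p a := by
        rw [hs, Bool.not_false, Bool.and_true]
      rw [hadd, h2, List.find?_append]
      by_cases hpa : p a = true
      · have h4 : List.find? p [a] = some a := by simp [hpa]
        rw [hpa, h4, Option.or_assoc, Option.some_or]
      · simp only [Bool.not_eq_true] at hpa
        have h4 : List.find? p [a] = none := by simp [hpa]
        rw [hpa, h4, Option.or_none]
        congr 1
        apply pvFind?_congr_mem
        intro x hx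
        by_cases hxa : x = a
        · subst hxa; simp [hpa]
        · have hc : List.contains (s ++ [a]) x = List.contains s x := by
            simp [hxa]
          rw [hc]

theorem pvFind?_ofList {α : Type} [BEq α] [LawfulBEq α] (p : α → Bool) (xs : List α) :
    List.find? p (PySem.Set.ofList xs) = List.find? p xs := by
  rw [PySem.Set.ofList, pvFind?_foldl_add p xs PySem.Set.empty]
  have hp : (fun x => p x && !(List.contains PySem.Set.empty x)) = p := by
    funext x; simp [PySem.Set.empty]
  rw [hp]
  simp [PySem.Set.empty]

theorem pvAll_ofList {α : Type} [BEq α] [LawfulBEq α] (q : α → Bool) (xs : List α) :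
    (PySem.Set.ofList xs).all q = xs.all q := by
  rw [Bool.eq_iff_iff]
  simp only [List.all_eq_true]
  constructor
  · intro h x hx; exact h x ((PySem.Set.mem_ofList xs x).mpr hx)
  · intro h x hx; exact h x ((PySem.Set.mem_ofList xs x).mp hx)

-- max? with a value-determined key is unchanged by ordered dedup.
theorem pvMax?_ofList {α : Type} [BEq α] [LawfulBEq α] (key : α → Int) (xs : List α) :
    PySem.List.max? (PySem.Set.ofList xs) key = PySem.List.max? xs key := by
  rw [pvMax?_eq_first_max key, pvMax?_eq_first_max key]
  have hp : (fun x => (PySem.Set.ofList xs).all fun y => decide (key y ≤ key x))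
      = (fun x => xs.all fun y => decide (key y ≤ key x)) := by
    funext x; exact pvAll_ofList _ xs
  rw [hp, pvFind?_ofList]


-- ========== B-side lemmas ==========

-- "x is a (first) element of l of maximal count exceeding bc"
def pvP (l : List Char) (bc : Nat) (x : Char) : Bool :=
  decide (bc < l.count x) && l.all (fun y => decide (l.count y ≤ l.count x))

theorem pvRem_count (t : List Char) (c x : Char) (hx : (x == c) = false) :
    (t.filter (fun z => z != c)).count x = t.count x := by
  apply List.count_filter
  simp [bne, hx]

theorem pvMem_rem {t : List Char} {c x : Char} (hx : x ∈ t) (hxc : x ≠ c) :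
    x ∈ t.filter (fun z => z != c) :=
  List.mem_filter.mpr ⟨hx, by simp [hxc]⟩

theorem pvRem_facts {t : List Char} (c : Char) {x : Char}
    (hx : x ∈ t.filter (fun z => z != c)) :
    (t.filter (fun z => z != c)).count x = (c :: t).count x ∧ x ≠ c ∧ x ∈ t := by
  have hmem := List.mem_filter.mp hx
  have hxc : x ≠ c := by
    have h2 := hmem.2
    simpa using h2
  refine ⟨?_, hxc, hmem.1⟩
  rw [pvRem_count t c x (beq_eq_false_iff_ne.mpr hxc), List.count_cons_of_ne (Ne.symm hxc)]

theorem pvFilterLen (t : List Char) (c : Char) :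
    (t.filter (fun z => z != c)).length + t.count c = t.length := by
  induction t with
  | nil => simp
  | cons a t ih =>
    by_cases h : a = c
    · subst h
      simp only [List.filter_cons, bne_self_eq_false, Bool.false_eq_true, if_false,
        List.count_cons_self, List.length_cons]
      omega
    · simp only [List.filter_cons, bne_iff_ne, ne_eq, h, not_false_eq_true, if_true,
        List.count_cons_of_ne h, List.length_cons]
      omega

theorem pvPc_false (c : Char) (t : List Char) (bc m : Nat)
    (hcm : (c :: t).count c ≤ m)
    (hy : ∃ y ∈ c :: t, m < (c :: t).count y) :
    pvP (c :: t) bc c = false := by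
  obtain ⟨y0, hy0m, hy0⟩ := hy
  have hall : ((c :: t).all fun y => decide ((c :: t).count y ≤ (c :: t).count c)) = false := by
    rw [List.all_eq_false]
    exact ⟨y0, hy0m, by simp only [decide_eq_true_eq]; omega⟩
  simp only [pvP, hall, Bool.and_false]

theorem pvP_transfer (c : Char) (t : List Char) (bc m : Nat)
    (hbc : bc ≤ m) (hcm : (c :: t).count c ≤ m)
    (hy : ∃ y ∈ c :: t, m < (c :: t).count y)
    (x : Char) (hxc : x ≠ c) (hxt : x ∈ t) :
    pvP (c :: t) bc x = pvP (t.filter (fun z => z != c)) m x := by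
  have hcx : (t.filter (fun z => z != c)).count x = (c :: t).count x :=
    (pvRem_facts c (pvMem_rem hxt hxc)).1
  rw [Bool.eq_iff_iff]
  simp only [pvP, Bool.and_eq_true, decide_eq_true_eq, List.all_eq_true]
  constructor
  · rintro ⟨h1, h2⟩
    obtain ⟨y0, hy0m, hy0⟩ := hy
    have hle0 : (c :: t).count y0 ≤ (c :: t).count x := h2 y0 hy0m
    refine ⟨by rw [hcx]; omega, ?_⟩
    intro y hyrem
    obtain ⟨hcy, hync, hyt⟩ := pvRem_facts c hyrem
    rw [hcy, hcx]
    exact h2 y (List.mem_cons_of_mem c hyt)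
  · rintro ⟨h1, h2⟩
    rw [hcx] at h1
    refine ⟨by omega, ?_⟩
    intro y hyl
    rcases List.mem_cons.mp hyl with rfl | hyt
    · omega
    · by_cases hyc : y = c
      · subst hyc; omega
      · have hyrem := pvMem_rem hyt hyc
        have h3 := h2 y hyrem
        rwa [(pvRem_facts c hyrem).1, hcx] at h3

theorem pvFind?_transfer (c : Char) (t : List Char) (bc m : Nat)
    (hbc : bc ≤ m) (hcm : (c :: t).count c ≤ m)
    (hy : ∃ y ∈ c :: t, m < (c :: t).count y) :
    (c :: t).find? (pvP (c :: t) bc) =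
      (t.filter (fun z => z != c)).find? (pvP (t.filter (fun z => z != c)) m) := by
  rw [List.find?_cons, pvPc_false c t bc m hcm hy, List.find?_filter]
  apply pvFind?_congr_mem
  intro x hx
  by_cases hxc : x = c
  · have h1 : pvP (c :: t) bc x = false := by
      rw [hxc]; exact pvPc_false c t bc m hcm hy
    rw [h1]
    simp [hxc]
  · rw [pvP_transfer c t bc m hbc hcm hy x hxc hx]
    simp [hxc]

theorem pvAll_transfer (c : Char) (t : List Char) (bc : Nat)
    (hcm : (c :: t).count c ≤ bc) :
    ((c :: t).all fun y => decide ((c :: t).count y ≤ bc)) =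
      ((t.filter (fun z => z != c)).all fun y =>
        decide ((t.filter (fun z => z != c)).count y ≤ bc)) := by
  rw [Bool.eq_iff_iff]
  simp only [List.all_eq_true, decide_eq_true_eq]
  constructor
  · intro h y hyrem
    obtain ⟨hcy, _, hyt⟩ := pvRem_facts c hyrem
    rw [hcy]
    exact h y (List.mem_cons_of_mem c hyt)
  · intro h y hyl
    rcases List.mem_cons.mp hyl with rfl | hyt
    · exact hcm
    · by_cases hyc : y = c
      · subst hyc; exact hcm
      · have hyrem := pvMem_rem hyt hyc
        have h3 := h y hyrem
        rwa [(pvRem_facts c hyrem).1] at h3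

-- pvSel computes: keep b if nothing beats bc, else the first element of maximal count (> bc).
theorem pvSel_spec :
    ∀ (n : Nat) (l : List Char), l.length ≤ n → ∀ (b : Option Char) (bc : Nat),
      pvSel l b bc =
        if l.all (fun y => decide (l.count y ≤ bc)) then b
        else l.find? (pvP l bc) := by
  intro n
  induction n with
  | zero =>
    intro l hl b bc
    have hnil : l = [] := List.eq_nil_of_length_eq_zero (Nat.le_zero.mp hl)
    subst hnil
    simp [pvSel]
  | succ n ih =>
    intro l hl b bc
    cases l with
    | nil => simp [pvSel]
    | cons c t =>
      have hremEq : (c :: t).filter (fun x => x != c) = t.filter (fun x => x != c) := by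
        simp
      have hlen2 : (t.filter (fun x => x != c)).length ≤ n :=
        le_trans (List.length_filter_le _ _) (Nat.le_of_succ_le_succ hl)
      have hcnt : (c :: t).length - (t.filter (fun x => x != c)).length
          = (c :: t).count c := by
        have h1 := pvFilterLen t c
        have h2 : (t.filter (fun z => z != c)).length ≤ t.length := List.length_filter_le _ _
        simp only [List.count_cons_self, List.length_cons]
        omega
      rw [pvSel]
      simp only [hremEq, hcnt]
      by_cases hlt : bc < (c :: t).count c
      · rw [if_pos hlt, ih _ hlen2]
        have hguardF : ((c :: t).all fun y => decide ((c :: t).count y ≤ bc)) = false := by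
          rw [List.all_eq_false]
          exact ⟨c, List.mem_cons_self, by simp only [decide_eq_true_eq]; omega⟩
        rw [hguardF]
        simp only [Bool.false_eq_true, if_false]
        by_cases hall : ((t.filter (fun x => x != c)).all fun y =>
            decide ((t.filter (fun x => x != c)).count y ≤ (c :: t).count c)) = true
        · rw [if_pos hall]
          have hPc : pvP (c :: t) bc c = true := by
            simp only [pvP, Bool.and_eq_true, decide_eq_true_eq, List.all_eq_true]
            refine ⟨hlt, ?_⟩
            intro y hyl
            rcases List.mem_cons.mp hyl with rfl | hyt
            · exact le_refl _
            · by_cases hyc : y = c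
              · subst hyc; exact le_refl _
              · have hyrem := pvMem_rem hyt hyc
                have h3 := List.all_eq_true.mp hall y hyrem
                have h4 := of_decide_eq_true h3
                rwa [(pvRem_facts c hyrem).1] at h4
          rw [List.find?_cons, hPc]
        · rw [if_neg hall]
          have hallF : ((t.filter (fun x => x != c)).all fun y =>
              decide ((t.filter (fun x => x != c)).count y ≤ (c :: t).count c)) = false := by
            simpa using hall
          have hy : ∃ y ∈ c :: t, (c :: t).count c < (c :: t).count y := by
            obtain ⟨y0, hy0rem, hy0⟩ := List.all_eq_false.mp hallF
            obtain ⟨hcy, _, hyt⟩ := pvRem_facts c hy0rem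
            refine ⟨y0, List.mem_cons_of_mem c hyt, ?_⟩
            rw [← hcy]
            have h5 : ¬ ((t.filter (fun x => x != c)).count y0 ≤ (c :: t).count c) := by
              simpa using hy0
            omega
          exact (pvFind?_transfer c t bc ((c :: t).count c) (le_of_lt hlt) (le_refl _) hy).symm
      · rw [if_neg hlt, ih _ hlen2]
        have hcm : (c :: t).count c ≤ bc := Nat.not_lt.mp hlt
        rw [pvAll_transfer c t bc hcm]
        by_cases hall : ((t.filter (fun x => x != c)).all fun y =>
            decide ((t.filter (fun x => x != c)).count y ≤ bc)) = true
        · rw [if_pos hall, if_pos hall]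
        · rw [if_neg hall, if_neg hall]
          have hallF : ((t.filter (fun x => x != c)).all fun y =>
              decide ((t.filter (fun x => x != c)).count y ≤ bc)) = false := by
            simpa using hall
          have hy : ∃ y ∈ c :: t, bc < (c :: t).count y := by
            obtain ⟨y0, hy0rem, hy0⟩ := List.all_eq_false.mp hallF
            obtain ⟨hcy, _, hyt⟩ := pvRem_facts c hy0rem
            refine ⟨y0, List.mem_cons_of_mem c hyt, ?_⟩
            rw [← hcy]
            have h5 : ¬ ((t.filter (fun x => x != c)).count y0 ≤ bc) := by
              simpa using hy0
            omega
          exact (pvFind?_transfer c t bc bc (le_refl _) hcm hy).symm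

-- ===== VERDICT (by name: the statement is the Claim_ definition above) =====
theorem most_occuring_first_letter_spec : Claim_equal_most_occuring_first_letter := by
  intro passage _ _
  unfold Spec_most_occuring_first_letter most_occuring_first_letter most_occuring_first_letter_alt
  have hstep :
      (PySem.Str.split₀ (PySem.Str.lower passage)).foldl
        (fun d w =>
          match PySem.Str.pyGet? w 0 with
          | none => d
          | some first_letter =>
            let d := if d.contains first_letter then d else d.insert first_letter 0
            d.insert first_letter (d.getD first_letter 0 + 1))
        (PySem.Dict.empty : PySem.Dict Char Int)
      = PySem.Dict.counter
          ((PySem.Str.split₀ (PySem.Str.lower passage)).filterMap (fun w => PySem.Str.pyGet? w 0)) := by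
    rw [← PySem.Dict.foldl_insert_getD_add_one_eq_counter, List.foldl_filterMap]
    congr 1
    funext d w
    cases PySem.Str.pyGet? w 0 with
    | none => rfl
    | some c => exact pvStepA_eq d c
  rw [hstep]
  simp only [PySem.Dict.keys_counter, PySem.Dict.getD_counter]
  rw [pvMax?_ofList]
  generalize ((PySem.Str.split₀ (PySem.Str.lower passage)).filterMap (fun w => PySem.Str.pyGet? w 0)) = fs
  cases fs with
  | nil => simp [pvSel, pvMax?_eq_foldl]
  | cons c t =>
    rw [pvMax?_eq_first_max, pvSel_spec (c :: t).length (c :: t) (le_refl _)]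
    have hguard : ((c :: t).all fun y => decide ((c :: t).count y ≤ 0)) = false := by
      rw [List.all_eq_false]
      refine ⟨c, List.mem_cons_self, ?_⟩
      simp [List.count_cons_self]
    rw [hguard]
    simp only [Bool.false_eq_true, if_false]
    have hpred :
        (c :: t).find? (fun x => (c :: t).all fun y =>
            decide ((((c :: t).count y : Nat) : Int) ≤ (((c :: t).count x : Nat) : Int)))
          = (c :: t).find? (pvP (c :: t) 0) := by
      apply pvFind?_congr_mem
      intro x hx
      unfold pvP
      have h0 : decide (0 < (c :: t).count x) = true := by
        simp [List.count_pos_iff.mpr hx]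
      rw [h0, Bool.true_and]
      have hkey : (fun y => decide ((((c :: t).count y : Nat) : Int) ≤ (((c :: t).count x : Nat) : Int)))
          = (fun y => decide ((c :: t).count y ≤ (c :: t).count x)) := by
        funext y
        rw [decide_eq_decide]
        exact Nat.cast_le
      rw [hkey]
    rw [hpred]
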